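-- pv_equiv track=rewrite | github.com/Mr-Harsh-Dixit/Project_Euler_Solutions | Python/Problem_057.py | add_scaled_digits
-- ===== SOURCE A (Python) =====
-- def add_scaled_digits(a: list[int], b: list[int], k: int) -> list[int]:
--     n = max(len(a), len(b))
--     out = []
--     carry = 0
--     for i in range(n):
--         da = a[i] if i < len(a) else 0
--         db = b[i] if i < len(b) else 0
--         s = da + k * db + carry
--         out.append(s % 10)
--         carry = s // 10
--     while carry:
--         out.append(carry % 10)
--         carry //= 10
--     return out
-- ===== SOURCE B (Python) =====
-- def add_scaled_digits(a: list[int], b: list[int], k: int) -> list[int]: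
--     va = 0
--     for d in reversed(a):
--         va = va * 10 + d
--     vb = 0
--     for d in reversed(b):
--         vb = vb * 10 + d
--     r = va + k * vb
--     out = []
--     while r > 0:
--         out.append(r % 10)
--         r //= 10
--     out += [0] * (max(len(a), len(b)) - len(out))
--     return out
-- ===== Notes on version B (the rewrite author's own statement) =====
-- stated objective: alternative
-- what changed: Replaces A's digit-by-digit carry-propagating pass with compute-then-decompose: Horner-evaluate both digit lists to integers, form va + k*vb, peel its decimal digits off with a while-loop, then pad with zeros to max(len(a), len(b)); Pre_ excludes inputs where the combined value is negative, on which A's trailing 'while carry' loop never terminates.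
import Mathlib
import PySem

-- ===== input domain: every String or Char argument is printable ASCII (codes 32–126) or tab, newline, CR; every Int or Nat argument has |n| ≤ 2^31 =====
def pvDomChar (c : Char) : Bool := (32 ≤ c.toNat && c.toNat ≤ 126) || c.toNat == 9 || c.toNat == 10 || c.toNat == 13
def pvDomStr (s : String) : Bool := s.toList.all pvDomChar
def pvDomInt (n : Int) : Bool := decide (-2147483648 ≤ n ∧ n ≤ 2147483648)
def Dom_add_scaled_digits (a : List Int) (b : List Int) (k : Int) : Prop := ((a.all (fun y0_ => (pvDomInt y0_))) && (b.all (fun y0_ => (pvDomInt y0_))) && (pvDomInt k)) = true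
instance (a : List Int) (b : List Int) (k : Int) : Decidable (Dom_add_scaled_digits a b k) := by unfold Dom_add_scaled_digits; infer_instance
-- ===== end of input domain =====

-- B replaces A's digit-by-digit carry pass with compute-then-decompose (Horner-evaluate, add,
-- peel decimal digits, pad with zeros); equivalence is claimed on Pre_ (combined value ≥ 0),
-- outside which A's trailing `while carry` loop never returns.

-- ===== PORT A =====
-- Python's `while carry:` loop (carry % 10 appended, carry //= 10) returns only when it reaches
-- carry = 0, which for floor division happens exactly when carry ≥ 0; this recursion is that loop,
-- step for step, wherever the loop returns (negative carry is outside Pre_).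
def carryDigits (c : Int) : List Int :=
  if h : 0 < c then PySem.Int.mod c 10 :: carryDigits (PySem.Int.floordiv c 10) else []
termination_by c.toNat
decreasing_by
  rw [PySem.Int.floordiv_eq_ediv_of_pos (by norm_num)]
  omega

-- the body of A's `for i in range(n)` loop, on state (out, carry)
def stepA (a b : List Int) (k : Int) (st : List Int × Int) (i : Int) : List Int × Int :=
  let da := if i < (a.length : Int) then PySem.List.pyGetD a i 0 else 0
  let db := if i < (b.length : Int) then PySem.List.pyGetD b i 0 else 0
  let s := da + k * db + st.2
  (st.1 ++ [PySem.Int.mod s 10], PySem.Int.floordiv s 10)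

def add_scaled_digits (a : List Int) (b : List Int) (k : Int) : List Int :=
  let n : Int := max (a.length : Int) (b.length : Int)
  let st := (PySem.List.pyRange 0 n 1).foldl (stepA a b k) ([], 0)
  st.1 ++ carryDigits st.2

-- ===== PORT B =====
-- B's `while r > 0:` digit-peeling loop
def decompDigits (r : Int) : List Int :=
  if h : 0 < r then PySem.Int.mod r 10 :: decompDigits (PySem.Int.floordiv r 10) else []
termination_by r.toNat
decreasing_by
  rw [PySem.Int.floordiv_eq_ediv_of_pos (by norm_num)]
  omega

def add_scaled_digits_alt (a : List Int) (b : List Int) (k : Int) : List Int :=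
  let va := a.reverse.foldl (fun acc d => acc * 10 + d) 0
  let vb := b.reverse.foldl (fun acc d => acc * 10 + d) 0
  let r := va + k * vb
  let out := decompDigits r
  out ++ List.replicate ((max (a.length : Int) (b.length : Int) - (out.length : Int)).toNat) 0

-- ===== PRECONDITION & SPEC =====
-- little-endian value of a digit list (used only to state Pre_)
def valLE : List Int → Int
  | [] => 0
  | d :: t => d + 10 * valLE t

-- Pre_ excludes exactly the inputs with negative combined value va + k*vb, on which A's
-- trailing `while carry` loop never terminates (carry stays negative under floor division).
def Pre_add_scaled_digits (a : List Int) (b : List Int) (k : Int) : Prop :=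
  0 ≤ valLE a + k * valLE b
instance (a : List Int) (b : List Int) (k : Int) : Decidable (Pre_add_scaled_digits a b k) := by
  unfold Pre_add_scaled_digits; infer_instance

def pvWitness_add_scaled_digits : List Int × List Int × Int := ([1, 2], [3], 2)

def Spec_add_scaled_digits (a : List Int) (b : List Int) (k : Int) (out : List Int) : Prop := out = add_scaled_digits_alt a b k
instance (a : List Int) (b : List Int) (k : Int) (out : List Int) : Decidable (Spec_add_scaled_digits a b k out) := by unfold Spec_add_scaled_digits; infer_instance

-- ===== CLAIM (what is proved, stated in full; the proofs are below) =====
def Claim_equal_add_scaled_digits : Prop := ∀ (a : List Int) (b : List Int) (k : Int), Dom_add_scaled_digits a b k → Pre_add_scaled_digits a b k → Spec_add_scaled_digits a b k (add_scaled_digits a b k)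

-- ===== LEMMAS AND PROOFS =====

theorem decompDigits_eq (c : Int) : decompDigits c = carryDigits c := by
  induction c using decompDigits.induct with
  | case1 c h ih =>
    rw [decompDigits, carryDigits, dif_pos h, dif_pos h, ih]
  | case2 c h =>
    rw [decompDigits, carryDigits, dif_neg h, dif_neg h]

-- A's for-loop as a recursion on the two lists (proof-side model of the fold)
def loopR : List Int → List Int → Int → Int → List Int × Int
  | [], [], _, c => ([], c)
  | [], db :: b, k, c =>
      let s := k * db + c
      let L := loopR [] b k (PySem.Int.floordiv s 10)
      (PySem.Int.mod s 10 :: L.1, L.2)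
  | da :: a, [], k, c =>
      let s := da + c
      let L := loopR a [] k (PySem.Int.floordiv s 10)
      (PySem.Int.mod s 10 :: L.1, L.2)
  | da :: a, db :: b, k, c =>
      let s := da + k * db + c
      let L := loopR a b k (PySem.Int.floordiv s 10)
      (PySem.Int.mod s 10 :: L.1, L.2)

theorem loopR_cons (a b : List Int) (k c : Int) (h : a ≠ [] ∨ b ≠ []) :
    loopR a b k c =
      ((PySem.Int.mod (a.headD 0 + k * b.headD 0 + c) 10) ::
        (loopR a.tail b.tail k (PySem.Int.floordiv (a.headD 0 + k * b.headD 0 + c) 10)).1,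
       (loopR a.tail b.tail k (PySem.Int.floordiv (a.headD 0 + k * b.headD 0 + c) 10)).2) := by
  cases a <;> cases b <;> simp [loopR] at h ⊢

theorem valLE_headD (a : List Int) : valLE a = a.headD 0 + 10 * valLE a.tail := by
  cases a <;> simp [valLE]

theorem mod10_of_decomp {t m q : Int} (hm : 0 ≤ m) (hm' : m < 10) (ht : t = m + 10 * q) :
    PySem.Int.mod t 10 = m ∧ PySem.Int.floordiv t 10 = q := by
  rw [PySem.Int.mod_eq_emod_of_pos (by norm_num), PySem.Int.floordiv_eq_ediv_of_pos (by norm_num)]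
  omega

theorem mod10_bounds (s : Int) : 0 ≤ PySem.Int.mod s 10 ∧ PySem.Int.mod s 10 < 10 := by
  rw [PySem.Int.mod_eq_emod_of_pos (by norm_num)]
  omega

theorem floordiv_mul_add_mod10 (s : Int) :
    PySem.Int.floordiv s 10 * 10 + PySem.Int.mod s 10 = s :=
  PySem.Int.floordiv_mul_add_mod s 10

-- main invariant: the loop's digits plus the decomposed final carry are the canonical digits
-- of the combined value, padded with zeros to the loop length
theorem loopR_digits (N : Nat) :
    ∀ (a b : List Int) (k c : Int), max a.length b.length = N →
      0 ≤ valLE a + k * valLE b + c →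
      (loopR a b k c).1 ++ carryDigits (loopR a b k c).2 =
        carryDigits (valLE a + k * valLE b + c) ++
          List.replicate (N - (carryDigits (valLE a + k * valLE b + c)).length) 0 := by
  induction N with
  | zero =>
    intro a b k c hN _
    have ha : a = [] := List.eq_nil_of_length_eq_zero (by omega)
    have hb : b = [] := List.eq_nil_of_length_eq_zero (by omega)
    subst ha; subst hb
    simp [loopR, valLE]
  | succ N ih =>
    intro a b k c hN hpos
    have hne : a ≠ [] ∨ b ≠ [] := by
      rcases a with _ | ⟨x, a⟩ <;> rcases b with _ | ⟨y, b⟩ <;> simp_all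
    set s := a.headD 0 + k * b.headD 0 + c with hs
    set f := PySem.Int.floordiv s 10 with hf
    set m := PySem.Int.mod s 10 with hm
    have hN' : max a.tail.length b.tail.length = N := by
      rcases a with _ | ⟨x, a⟩ <;> rcases b with _ | ⟨y, b⟩ <;> simp_all <;> omega
    have h10 : f * 10 + m = s := floordiv_mul_add_mod10 s
    have hsplit : valLE a + k * valLE b + c =
        m + 10 * (valLE a.tail + k * valLE b.tail + f) := by
      have ha := valLE_headD a
      have hb : k * valLE b = k * (b.headD 0) + 10 * (k * valLE b.tail) := by
        conv_lhs => rw [valLE_headD b]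
        ring
      linarith
    obtain ⟨hm0, hm10⟩ := mod10_bounds s
    rw [← hm] at hm0 hm10
    set V := valLE a + k * valLE b + c with hV
    set T := valLE a.tail + k * valLE b.tail + f with hT
    have hpos' : 0 ≤ T := by omega
    have hih := ih a.tail b.tail k f hN' hpos'
    rw [← hT] at hih
    rw [loopR_cons a b k c hne]
    simp only [← hs, ← hf, ← hm]
    rw [List.cons_append, hih]
    by_cases hVpos : 0 < V
    · obtain ⟨hmod, hdiv⟩ := mod10_of_decomp hm0 hm10 hsplit
      conv_rhs => rw [carryDigits]
      rw [dif_pos hVpos, hmod, hdiv]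
      have hlen : N + 1 - ((carryDigits T).length + 1) = N - (carryDigits T).length := by omega
      simp [List.cons_append, hlen]
    · have hV0 : V = 0 := by omega
      have hm0' : m = 0 := by omega
      have hT0 : T = 0 := by omega
      have hc0 : carryDigits 0 = [] := by rw [carryDigits]; norm_num
      rw [hT0, hc0] at hih ⊢
      rw [hV0, hc0, hm0']
      simp [List.replicate_succ]

-- the fold over range(i, n) equals loopR on the dropped suffixes
theorem fold_eq_loopR (j : Nat) :
    ∀ (a b : List Int) (k c : Int) (out : List Int) (i : Nat),
      i + j = max a.length b.length →
      (PySem.List.pyRange (i : Int) (max (a.length : Int) (b.length : Int)) 1).foldl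
          (stepA a b k) (out, c) =
        (out ++ (loopR (a.drop i) (b.drop i) k c).1, (loopR (a.drop i) (b.drop i) k c).2) := by
  induction j with
  | zero =>
    intro a b k c out i hij
    have hmax : max (a.length : Int) (b.length : Int) = (i : Int) := by
      push_cast; omega
    rw [hmax, PySem.List.pyRange_one_eq_nil (le_refl _)]
    have hda : a.drop i = [] := List.drop_eq_nil_of_le (by omega)
    have hdb : b.drop i = [] := List.drop_eq_nil_of_le (by omega)
    simp [hda, hdb, loopR]
  | succ j ih =>
    intro a b k c out i hij
    have hcast : max (a.length : Int) (b.length : Int) = ((max a.length b.length : Nat) : Int) := by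
      push_cast; omega
    have hlt : (i : Int) < max (a.length : Int) (b.length : Int) := by
      rw [hcast]; exact_mod_cast (by omega : i < max a.length b.length)
    rw [PySem.List.pyRange_one_cons hlt]
    rw [List.foldl_cons]
    have hda : (if (i : Int) < (a.length : Int) then PySem.List.pyGetD a (i : Int) 0 else 0)
        = (a.drop i).headD 0 := by
      by_cases h : i < a.length
      · rw [if_pos (by exact_mod_cast h)]
        rw [PySem.List.pyGetD_natCast]
        rw [List.headD_eq_head?_getD, List.head?_drop]
        simp [List.getD, List.getElem?_eq_getElem h]
      · rw [if_neg (by push_cast; omega)]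
        rw [List.drop_eq_nil_of_le (by omega)]
        rfl
    have hdb : (if (i : Int) < (b.length : Int) then PySem.List.pyGetD b (i : Int) 0 else 0)
        = (b.drop i).headD 0 := by
      by_cases h : i < b.length
      · rw [if_pos (by exact_mod_cast h)]
        rw [PySem.List.pyGetD_natCast]
        rw [List.headD_eq_head?_getD, List.head?_drop]
        simp [List.getD, List.getElem?_eq_getElem h]
      · rw [if_neg (by push_cast; omega)]
        rw [List.drop_eq_nil_of_le (by omega)]
        rfl
    have hne : a.drop i ≠ [] ∨ b.drop i ≠ [] := by
      by_cases h : i < a.length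
      · exact Or.inl (by simp [List.drop_eq_nil_iff]; omega)
      · refine Or.inr (by simp [List.drop_eq_nil_iff]; omega)
    have hstep : stepA a b k (out, c) (i : Int) =
        (out ++ [PySem.Int.mod ((a.drop i).headD 0 + k * (b.drop i).headD 0 + c) 10],
         PySem.Int.floordiv ((a.drop i).headD 0 + k * (b.drop i).headD 0 + c) 10) := by
      simp only [stepA, hda, hdb]
    rw [hstep]
    have hcast1 : (i : Int) + 1 = ((i + 1 : Nat) : Int) := by push_cast; ring
    rw [hcast1, ih a b k _ _ (i + 1) (by omega)]
    rw [loopR_cons _ _ k c hne]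
    simp [List.tail_drop, List.append_assoc]

theorem horner_eq_valLE (a : List Int) :
    a.reverse.foldl (fun acc d => acc * 10 + d) 0 = valLE a := by
  rw [List.foldl_reverse]
  induction a with
  | nil => simp [valLE]
  | cons d t ih => simp [valLE, ih]; ring

-- ===== VERDICT (by name: the statement is the Claim_ definition above) =====
theorem add_scaled_digits_spec : Claim_equal_add_scaled_digits := by
  intro a b k _ hpre
  unfold Spec_add_scaled_digits
  unfold Pre_add_scaled_digits at hpre
  have hA : add_scaled_digits a b k =
      (loopR a b k 0).1 ++ carryDigits (loopR a b k 0).2 := by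
    unfold add_scaled_digits
    have := fold_eq_loopR (max a.length b.length) a b k 0 [] 0 (by omega)
    simp only [Nat.cast_zero, List.drop_zero] at this
    simp only [this]
    simp
  have hpos : 0 ≤ valLE a + k * valLE b + 0 := by omega
  have hdig := loopR_digits (max a.length b.length) a b k 0 rfl hpos
  rw [hA, hdig]
  simp only [add_scaled_digits_alt, horner_eq_valLE, decompDigits_eq]
  have h0 : valLE a + k * valLE b + 0 = valLE a + k * valLE b := by ring
  rw [h0]
  congr 2
  rw [← Nat.cast_max]
  omega
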